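-- pv_equiv track=rewrite | github.com/jaypierce/cp | leetcode/1385.py | findTheDistanceValue
-- ===== SOURCE A (Python) =====
-- from typing import List
--
-- def findTheDistanceValue(arr1: List[int], arr2: List[int], d: int) -> int:
--
--     arr2.sort()
--     out = 0
--
--     for i in arr1:
--         l, r = 0, len(arr2) - 1
--
--         while l <= r:
--             mid = (l+r)//2
--
--             if abs(i-arr2[mid]) <= d:
--                 out -= 1
--                 break
--             elif arr2[mid] > i:
--                 r = mid - 1
--             else:
--                 l = mid + 1
--         out += 1
--     return out
-- ===== SOURCE B (Python) =====
-- def findTheDistanceValue(arr1, arr2, d):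
--     arr2.sort()
--     m = len(arr2)
--     out = 0
--     j = 0
--     for x in sorted(arr1):
--         while j < m and arr2[j] < x - d:
--             j += 1
--         if not (j < m and arr2[j] <= x + d):
--             out += 1
--     return out
-- ===== Notes on version B (the rewrite author's own statement) =====
-- stated objective: alternative
-- what changed: Replaces A's per-element binary search over sorted arr2 by a single merge-style sweep: arr1 is also sorted (a copy; arr2 is still sorted in place like A) and one monotone pointer into arr2 skips past elements below x-d, deciding each element in O(1) amortized instead of O(log m); measured cost is comparable.
import Mathlib
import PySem

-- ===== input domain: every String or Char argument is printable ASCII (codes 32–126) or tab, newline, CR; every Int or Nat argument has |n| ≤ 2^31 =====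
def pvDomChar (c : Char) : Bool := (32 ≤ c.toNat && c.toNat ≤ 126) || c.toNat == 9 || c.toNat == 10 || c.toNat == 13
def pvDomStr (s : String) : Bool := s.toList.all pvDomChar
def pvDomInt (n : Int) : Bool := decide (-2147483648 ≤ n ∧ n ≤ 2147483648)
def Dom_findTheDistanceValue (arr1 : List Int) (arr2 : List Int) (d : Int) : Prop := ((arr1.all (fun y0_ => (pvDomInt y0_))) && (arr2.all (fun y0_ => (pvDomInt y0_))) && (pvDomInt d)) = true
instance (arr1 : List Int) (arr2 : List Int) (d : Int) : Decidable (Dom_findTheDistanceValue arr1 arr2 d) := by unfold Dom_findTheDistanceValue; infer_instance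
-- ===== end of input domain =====

-- B replaces A's per-element binary search by one merge-style sweep over a sorted copy of
-- arr1 with a monotone pointer into arr2 (which B, like A, sorts in place); comparable cost.

-- ===== PORT A =====
-- the 'while l <= r' binary-search loop of A; returns the total change to 'out' made
-- inside the loop body (-1 when it breaks after a hit, 0 when the loop exits normally)
def pvBsA (a : List Int) (i d l r : Int) : Int :=
  if _h : l ≤ r then
    let mid := PySem.Int.floordiv (l + r) 2
    let v := PySem.List.pyGetD a mid 0
    if |i - v| ≤ d then -1
    else if v > i then pvBsA a i d l (mid - 1)
    else pvBsA a i d (mid + 1) r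
  else 0
termination_by (r - l + 1).toNat
decreasing_by
  · have := PySem.Int.floordiv_two_mid_bounds (lo := l) (hi := r) _h
    omega
  · have := PySem.Int.floordiv_two_mid_bounds (lo := l) (hi := r) _h
    omega

def findTheDistanceValue (arr1 : List Int) (arr2 : List Int) (d : Int) : Int :=
  let a2 := PySem.List.sorted arr2 (fun x => x) false    -- arr2.sort()
  arr1.foldl (fun out i => (out + pvBsA a2 i d 0 ((a2.length : Int) - 1)) + 1) 0

-- ===== PORT B =====
-- the 'while j < m and arr2[j] < x - d' pointer advance of B
def pvAdvance (s2 : List Int) (t : Int) (j : Nat) : Nat :=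
  if _h : j < s2.length ∧ s2.getD j 0 < t then pvAdvance s2 t (j + 1) else j
termination_by s2.length - j
decreasing_by omega

-- the 'for x in sorted(arr1)' sweep of B, carrying the pointer j and the count
def pvSweep (s2 : List Int) (d : Int) : List Int → Nat → Int → Int
  | [], _j, c => c
  | x :: xs, j, c =>
    let j' := pvAdvance s2 (x - d) j
    pvSweep s2 d xs j' (if j' < s2.length ∧ s2.getD j' 0 ≤ x + d then c else c + 1)

def findTheDistanceValue_alt (arr1 : List Int) (arr2 : List Int) (d : Int) : Int :=
  let s2 := PySem.List.sorted arr2 (fun x => x) false    -- arr2.sort()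
  pvSweep s2 d (PySem.List.sorted arr1 (fun x => x) false) 0 0

-- ===== PRECONDITION & SPEC =====
def Spec_findTheDistanceValue (arr1 : List Int) (arr2 : List Int) (d : Int) (out : Int) : Prop := out = findTheDistanceValue_alt arr1 arr2 d
instance (arr1 : List Int) (arr2 : List Int) (d : Int) (out : Int) : Decidable (Spec_findTheDistanceValue arr1 arr2 d out) := by unfold Spec_findTheDistanceValue; infer_instance

-- ===== CLAIM (what is proved, stated in full; the proofs are below) =====
def Claim_equal_findTheDistanceValue : Prop := ∀ (arr1 : List Int) (arr2 : List Int) (d : Int), Dom_findTheDistanceValue arr1 arr2 d → Spec_findTheDistanceValue arr1 arr2 d (findTheDistanceValue arr1 arr2 d)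

-- ===== LEMMAS AND PROOFS =====

-- monotonicity of a sorted list read through getD
theorem pvGetD_mono (a : List Int) (hs : a.Pairwise (· ≤ ·)) (p q : Nat)
    (hpq : p ≤ q) (hq : q < a.length) : a.getD p 0 ≤ a.getD q 0 := by
  rcases lt_or_eq_of_le hpq with h | h
  · rw [List.getD_eq_getElem a 0 (lt_trans h hq), List.getD_eq_getElem a 0 hq]
    exact List.pairwise_iff_getElem.mp hs p q _ _ h
  · subst h; exact le_refl _

-- when an element within d exists in the window [l,r], A's binary search breaks with -1
theorem pvBsA_hit : ∀ (n : Nat) (a : List Int) (i d l r : Int),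
    (r - l + 1).toNat ≤ n → a.Pairwise (· ≤ ·) → 0 ≤ l → r < (a.length : Int) →
    ∀ k : Nat, l ≤ (k : Int) → (k : Int) ≤ r → |i - a.getD k 0| ≤ d →
    pvBsA a i d l r = -1 := by
  intro n
  induction n with
  | zero =>
    intro a i d l r hn _ _ _ k hk1 hk2 _
    omega
  | succ n ih =>
    intro a i d l r hn hs hl hr k hk1 hk2 hkd
    have hlr : l ≤ r := le_trans hk1 hk2
    rw [pvBsA]
    simp only [hlr, dif_pos]
    have hmid := PySem.Int.floordiv_two_mid_bounds (lo := l) (hi := r) hlr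
    set mid := PySem.Int.floordiv (l + r) 2 with hmiddef
    have hmidlen : mid < (a.length : Int) := lt_of_le_of_lt hmid.2 hr
    have hvmid : PySem.List.pyGetD a mid 0 = a.getD mid.toNat 0 := by
      rw [PySem.List.pyGetD_eq_getElem a 0 (by omega) hmidlen,
          List.getD_eq_getElem a 0 (by omega)]
    by_cases hfound : |i - PySem.List.pyGetD a mid 0| ≤ d
    · simp [hfound]
    · simp only [hfound, if_false]
      have hklen : k < a.length := by omega
      by_cases hgt : PySem.List.pyGetD a mid 0 > i
      · -- all indices ≥ mid are > i + d, so the hit k is left of mid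
        simp only [hgt, if_true]
        have hkmid : (k : Int) < mid := by
          by_contra hge
          push Not at hge
          have hle : a.getD mid.toNat 0 ≤ a.getD k 0 :=
            pvGetD_mono a hs mid.toNat k (by omega) hklen
          rw [hvmid] at hgt hfound
          have : d < a.getD mid.toNat 0 - i := by
            rcases abs_cases (i - a.getD mid.toNat 0) with ⟨h1, h2⟩ | ⟨h1, h2⟩ <;> omega
          have : d < |i - a.getD k 0| := by
            rcases abs_cases (i - a.getD k 0) with ⟨h1, h2⟩ | ⟨h1, h2⟩ <;> omega
          omega
        exact ih a i d l (mid - 1) (by omega) hs hl (by omega) k hk1 (by omega) hkd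
      · -- all indices ≤ mid are < i - d, so the hit k is right of mid
        simp only [hgt, if_false]
        push Not at hgt
        have hkmid : mid < (k : Int) := by
          by_contra hge
          push Not at hge
          have hle : a.getD k 0 ≤ a.getD mid.toNat 0 :=
            pvGetD_mono a hs k mid.toNat (by omega) (by omega)
          rw [hvmid] at hgt hfound
          have : d < i - a.getD mid.toNat 0 := by
            rcases abs_cases (i - a.getD mid.toNat 0) with ⟨h1, h2⟩ | ⟨h1, h2⟩ <;> omega
          have : d < |i - a.getD k 0| := by
            rcases abs_cases (i - a.getD k 0) with ⟨h1, h2⟩ | ⟨h1, h2⟩ <;> omega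
          omega
        exact ih a i d (mid + 1) r (by omega) hs (by omega) hr k (by omega) hk2 hkd

-- when no element within d exists in the window, the loop exits normally with 0
theorem pvBsA_no_hit : ∀ (n : Nat) (a : List Int) (i d l r : Int),
    (r - l + 1).toNat ≤ n → 0 ≤ l → r < (a.length : Int) →
    (∀ k : Nat, l ≤ (k : Int) → (k : Int) ≤ r → d < |i - a.getD k 0|) →
    pvBsA a i d l r = 0 := by
  intro n
  induction n with
  | zero =>
    intro a i d l r hn hl hr hno
    rw [pvBsA]
    have : ¬ l ≤ r := by omega
    simp [this]
  | succ n ih =>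
    intro a i d l r hn hl hr hno
    rw [pvBsA]
    by_cases hlr : l ≤ r
    · simp only [hlr, dif_pos]
      have hmid := PySem.Int.floordiv_two_mid_bounds (lo := l) (hi := r) hlr
      set mid := PySem.Int.floordiv (l + r) 2 with hmiddef
      have hmidlen : mid < (a.length : Int) := lt_of_le_of_lt hmid.2 hr
      have hvmid : PySem.List.pyGetD a mid 0 = a.getD mid.toNat 0 := by
        rw [PySem.List.pyGetD_eq_getElem a 0 (by omega) hmidlen,
            List.getD_eq_getElem a 0 (by omega)]
      have hno_mid : ¬ |i - PySem.List.pyGetD a mid 0| ≤ d := by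
        rw [hvmid]
        have := hno mid.toNat (by omega) (by omega)
        omega
      simp only [hno_mid, if_false]
      by_cases hgt : PySem.List.pyGetD a mid 0 > i
      · simp only [hgt, if_true]
        exact ih a i d l (mid - 1) (by omega) hl (by omega)
          (fun k h1 h2 => hno k h1 (by omega))
      · simp only [hgt, if_false]
        exact ih a i d (mid + 1) r (by omega) (by omega) hr
          (fun k h1 h2 => hno k (by omega) h2)
    · simp [hlr]

-- per-element value of A's inner loop over the whole sorted array,
-- phrased by membership in arr2 (sorted is a permutation)
theorem pvInner_eq (arr2 : List Int) (i d : Int) :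
    pvBsA (PySem.List.sorted arr2 (fun x => x) false) i d 0
      (((PySem.List.sorted arr2 (fun x => x) false).length : Int) - 1)
    = (if arr2.all (fun y => decide (d < |i - y|)) then 0 else -1) := by
  set a := PySem.List.sorted arr2 (fun x => x) false with ha
  have hs : a.Pairwise (· ≤ ·) := by
    have := PySem.List.sorted_pairwise (xs := arr2) (key := fun x => x)
    simpa using this
  have hperm : a.Perm arr2 := PySem.List.sorted_perm ..
  by_cases hall : arr2.all (fun y => decide (d < |i - y|))
  · simp only [hall, if_true]
    apply pvBsA_no_hit ((a.length : Int) - 0 + 1 - 1).toNat a i d 0 ((a.length : Int) - 1)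
      (by omega) (by omega) (by omega)
    intro k hk1 hk2
    have hklen : k < a.length := by omega
    have hmem : a.getD k 0 ∈ arr2 := by
      rw [List.getD_eq_getElem a 0 hklen]
      exact hperm.mem_iff.mp (a.getElem_mem hklen)
    have := List.all_eq_true.mp hall _ hmem
    simpa using this
  · simp only [hall, Bool.false_eq_true, if_false]
    have : ∃ y ∈ arr2, ¬ d < |i - y| := by
      by_contra hc
      push Not at hc
      exact hall (List.all_eq_true.mpr (fun y hy => by simpa using hc y hy))
    obtain ⟨y, hy, hyd⟩ := this
    have hya : y ∈ a := hperm.mem_iff.mpr hy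
    obtain ⟨k, hklen, hk⟩ := List.mem_iff_getElem.mp hya
    apply pvBsA_hit ((a.length : Int) - 0 + 1 - 1).toNat a i d 0 ((a.length : Int) - 1)
      (by omega) hs (by omega) (by omega) k (by omega) (by omega)
    rw [List.getD_eq_getElem a 0 hklen, hk]
    omega

-- A's whole fold equals the canonical "count the good elements" fold over arr1
theorem pvFoldA_eq (arr2 : List Int) (d : Int) : ∀ (arr1 : List Int) (c : Int),
    arr1.foldl (fun out i => (out + pvBsA (PySem.List.sorted arr2 (fun x => x) false) i d 0
        (((PySem.List.sorted arr2 (fun x => x) false).length : Int) - 1)) + 1) c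
    = arr1.foldl (fun c x => if arr2.all (fun y => decide (d < |x - y|)) then c + 1 else c) c := by
  intro arr1
  induction arr1 with
  | nil => intro c; rfl
  | cons x xs ih =>
    intro c
    simp only [List.foldl_cons]
    rw [pvInner_eq arr2 x d, ih]
    by_cases h : arr2.all (fun y => decide (d < |x - y|)) <;> simp [h]

-- the canonical fold counts with countP
theorem pvFoldCount (p : Int → Bool) : ∀ (l : List Int) (c : Int),
    l.foldl (fun c x => if p x then c + 1 else c) c = c + (l.countP p : Int) := by
  intro l
  induction l with
  | nil => intro c; simp
  | cons x xs ih =>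
    intro c
    simp only [List.foldl_cons, List.countP_cons]
    rw [ih]
    by_cases h : p x <;> simp [h] <;> omega

-- pvAdvance: the pointer only grows, everything it skips is < t, and it stops at the
-- first index that is not < t
theorem pvAdv_spec (s2 : List Int) (t : Int) : ∀ (n j : Nat), s2.length - j ≤ n →
    j ≤ pvAdvance s2 t j ∧
    (∀ k, j ≤ k → k < pvAdvance s2 t j → k < s2.length ∧ s2.getD k 0 < t) ∧
    (pvAdvance s2 t j < s2.length → ¬ s2.getD (pvAdvance s2 t j) 0 < t) := by
  intro n
  induction n with
  | zero =>
    intro j hn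
    rw [pvAdvance]
    have hc : ¬ (j < s2.length ∧ s2.getD j 0 < t) := by omega
    rw [dif_neg hc]
    exact ⟨le_refl _, fun k h1 h2 => absurd (lt_of_le_of_lt h1 h2) (lt_irrefl j),
           fun h hlt => hc ⟨h, hlt⟩⟩
  | succ n ih =>
    intro j hn
    rw [pvAdvance]
    by_cases hc : j < s2.length ∧ s2.getD j 0 < t
    · rw [dif_pos hc]
      obtain ⟨h1, h2, h3⟩ := ih (j + 1) (by omega)
      refine ⟨by omega, ?_, h3⟩
      intro k hk1 hk2
      rcases Nat.eq_or_lt_of_le hk1 with h | h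
      · exact h ▸ ⟨hc.1, hc.2⟩
      · exact h2 k h hk2
    · rw [dif_neg hc]
      exact ⟨le_refl _, fun k h1 h2 => absurd (lt_of_le_of_lt h1 h2) (lt_irrefl j),
             fun h hlt => hc ⟨h, hlt⟩⟩

-- after the advance, B's window test is exactly "some arr2 element is within d of x"
theorem pvHit_iff (s2 : List Int) (hs2 : s2.Pairwise (· ≤ ·)) (d x : Int) (j : Nat)
    (hinv : ∀ k, k < j → k < s2.length → s2.getD k 0 < x - d) :
    ((pvAdvance s2 (x - d) j < s2.length ∧ s2.getD (pvAdvance s2 (x - d) j) 0 ≤ x + d)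
      ↔ ∃ y ∈ s2, |x - y| ≤ d) := by
  obtain ⟨hge, hskip, hstop⟩ := pvAdv_spec s2 (x - d) s2.length j (by omega)
  set j' := pvAdvance s2 (x - d) j with hj'
  constructor
  · rintro ⟨hlt, hle⟩
    refine ⟨s2.getD j' 0, ?_, ?_⟩
    · rw [List.getD_eq_getElem s2 0 hlt]; exact s2.getElem_mem hlt
    · have := hstop hlt
      rcases abs_cases (x - s2.getD j' 0) with ⟨h1, h2⟩ | ⟨h1, h2⟩ <;> omega
  · rintro ⟨y, hy, hyd⟩
    obtain ⟨k, hklen, hk⟩ := List.mem_iff_getElem.mp hy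
    have hky : s2.getD k 0 = y := by rw [List.getD_eq_getElem s2 0 hklen]; exact hk
    have hxd : x - d ≤ y := by
      rcases abs_cases (x - y) with ⟨h1, h2⟩ | ⟨h1, h2⟩ <;> omega
    have hkj : j' ≤ k := by
      by_contra hlt
      push Not at hlt
      have : s2.getD k 0 < x - d := by
        rcases Nat.lt_or_ge k j with h | h
        · exact hinv k h hklen
        · exact (hskip k h hlt).2
      omega
    refine ⟨by omega, ?_⟩
    have hmono : s2.getD j' 0 ≤ s2.getD k 0 := pvGetD_mono s2 hs2 j' k hkj hklen
    rcases abs_cases (x - y) with ⟨h1, h2⟩ | ⟨h1, h2⟩ <;> omega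

-- the sweep computes the canonical fold over the sorted arr1
theorem pvSweep_eq (s2 : List Int) (hs2 : s2.Pairwise (· ≤ ·)) (d : Int) :
    ∀ (s1 : List Int), s1.Pairwise (· ≤ ·) → ∀ (j : Nat) (c : Int),
    (∀ x ∈ s1, ∀ k, k < j → k < s2.length → s2.getD k 0 < x - d) →
    pvSweep s2 d s1 j c
      = s1.foldl (fun c x => if s2.all (fun y => decide (d < |x - y|)) then c + 1 else c) c := by
  intro s1
  induction s1 with
  | nil => intro _ j c _; rfl
  | cons x xs ih =>
    intro hp j c hinv
    rw [List.pairwise_cons] at hp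
    rw [pvSweep]
    simp only [List.foldl_cons]
    obtain ⟨hge, hskip, _⟩ := pvAdv_spec s2 (x - d) s2.length j (by omega)
    have hhit := pvHit_iff s2 hs2 d x j (hinv x (List.mem_cons_self ..))
    set j' := pvAdvance s2 (x - d) j with hj'
    have hall : (s2.all (fun y => decide (d < |x - y|)) = true) ↔ ¬ ∃ y ∈ s2, |x - y| ≤ d := by
      simp only [List.all_eq_true, decide_eq_true_eq]
      constructor
      · rintro h ⟨y, hy, hyd⟩; have := h y hy; omega
      · intro h y hy
        by_contra hc
        exact h ⟨y, hy, by omega⟩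
    have hinv' : ∀ x' ∈ xs, ∀ k, k < j' → k < s2.length → s2.getD k 0 < x' - d := by
      intro x' hx' k hk hklen
      have hxx' : x ≤ x' := hp.1 x' hx'
      have : s2.getD k 0 < x - d := by
        rcases Nat.lt_or_ge k j with h | h
        · exact hinv x (List.mem_cons_self ..) k h hklen
        · exact (hskip k h hk).2
      omega
    rw [ih hp.2 j' _ hinv']
    by_cases hex : ∃ y ∈ s2, |x - y| ≤ d
    · have h1 : (j' < s2.length ∧ s2.getD j' 0 ≤ x + d) := hhit.mpr hex
      have h2 : ¬ s2.all (fun y => decide (d < |x - y|)) = true := fun h => (hall.mp h) hex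
      rw [if_pos h1, if_neg h2]
    · have h1 : ¬ (j' < s2.length ∧ s2.getD j' 0 ≤ x + d) := fun h => hex (hhit.mp h)
      have h2 : s2.all (fun y => decide (d < |x - y|)) = true := hall.mpr hex
      rw [if_neg h1, if_pos h2]

-- all over a permutation
theorem pvAll_perm (s2 arr2 : List Int) (h : s2.Perm arr2) (p : Int → Bool) :
    s2.all p = arr2.all p := by
  cases h2 : arr2.all p
  · cases h1 : s2.all p
    · rfl
    · exfalso
      rw [List.all_eq_true] at h1
      have : arr2.all p = true := List.all_eq_true.mpr (fun y hy => h1 y (h.mem_iff.mpr hy))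
      rw [h2] at this; exact Bool.false_ne_true this
  · rw [List.all_eq_true] at h2 ⊢
    exact fun y hy => h2 y (h.mem_iff.mp hy)

-- ===== VERDICT (by name: the statement is the Claim_ definition above) =====
theorem findTheDistanceValue_spec : Claim_equal_findTheDistanceValue := by
  intro arr1 arr2 d _
  unfold Spec_findTheDistanceValue findTheDistanceValue findTheDistanceValue_alt
  set s2 := PySem.List.sorted arr2 (fun x => x) false with hs2def
  set s1 := PySem.List.sorted arr1 (fun x => x) false with hs1def
  have hs2 : s2.Pairwise (· ≤ ·) := by
    have := PySem.List.sorted_pairwise (xs := arr2) (key := fun x => x)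
    simpa using this
  have hs1 : s1.Pairwise (· ≤ ·) := by
    have := PySem.List.sorted_pairwise (xs := arr1) (key := fun x => x)
    simpa using this
  have hperm2 : s2.Perm arr2 := PySem.List.sorted_perm ..
  have hperm1 : s1.Perm arr1 := PySem.List.sorted_perm ..
  rw [pvFoldA_eq arr2 d arr1 0,
      pvSweep_eq s2 hs2 d s1 hs1 0 0 (fun x _ k hk _ => absurd hk (Nat.not_lt_zero k))]
  have hfun : ∀ x : Int, s2.all (fun y => decide (d < |x - y|))
      = arr2.all (fun y => decide (d < |x - y|)) :=
    fun x => pvAll_perm s2 arr2 hperm2 (fun y => decide (d < |x - y|))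
  simp only [hfun]
  rw [pvFoldCount _ arr1 0, pvFoldCount _ s1 0,
      hperm1.countP_eq (fun x => arr2.all (fun y => decide (d < |x - y|)))]
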